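-- pv_equiv track=rewrite | github.com/jvillarreal7/2022-advent-of-code | 05-supply-stacks/python/main.py | build_initial_stacks
-- ===== SOURCE A (Python) =====
-- def build_initial_stacks(
--     horizontal_stacks_group: list[list[str]], stack_quantity: int
-- ) -> list[list[str]]:
--     stacks = [[] for i in range(stack_quantity)]
--     for i, stack in enumerate(stacks):
--         for group in horizontal_stacks_group:
--             for j, element in enumerate(group):
--                 if i == j and element:
--                     stack.append(element)
--     return stacks
-- ===== SOURCE B (Python) =====
-- def build_initial_stacks(
--     horizontal_stacks_group: list[list[str]], stack_quantity: int
-- ) -> list[list[str]]: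
--     # Pivot: transpose the rows into columns, drop empty cells, pad to stack_quantity.
--     q = max(stack_quantity, 0)
--     width = 0
--     for row in horizontal_stacks_group:
--         width = max(width, len(row))
--     cols = [
--         [row[j] for row in horizontal_stacks_group if j < len(row)]
--         for j in range(min(width, q))
--     ]
--     stacks = [[e for e in col if e] for col in cols]
--     stacks.extend([] for _ in range(q - len(stacks)))
--     return stacks
-- ===== Notes on version B (the rewrite author's own statement) =====
-- stated objective: faster
-- what changed: B pivots the grid: it computes the row-length maximum, builds each column of the transpose directly (skipping rows too short to reach it), filters out empty cells, and pads with empty stacks up to stack_quantity, instead of A's per-stack-index rescan of every row and every element.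
import Mathlib
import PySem

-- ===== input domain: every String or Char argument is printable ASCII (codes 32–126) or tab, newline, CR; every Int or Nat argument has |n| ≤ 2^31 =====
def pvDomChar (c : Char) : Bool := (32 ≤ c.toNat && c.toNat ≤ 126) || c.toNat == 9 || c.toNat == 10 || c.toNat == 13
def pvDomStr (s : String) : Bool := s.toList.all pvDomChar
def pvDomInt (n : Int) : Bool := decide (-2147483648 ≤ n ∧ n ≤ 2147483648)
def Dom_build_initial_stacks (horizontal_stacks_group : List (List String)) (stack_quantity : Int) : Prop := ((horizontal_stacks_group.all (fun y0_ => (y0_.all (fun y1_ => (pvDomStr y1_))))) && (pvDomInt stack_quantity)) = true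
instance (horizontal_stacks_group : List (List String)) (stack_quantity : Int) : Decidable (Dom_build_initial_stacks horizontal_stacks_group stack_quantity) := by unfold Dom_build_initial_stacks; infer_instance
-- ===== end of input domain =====

-- B replaces A's per-stack rescan of all rows by a pivot: build the columns of the
-- transposed grid, drop empty cells, pad with empty stacks to stack_quantity (measured faster).

-- ===== PORT A =====
def build_initial_stacks (horizontal_stacks_group : List (List String)) (stack_quantity : Int) : List (List String) :=
  let sts : List (List String) := (PySem.List.pyRange 0 stack_quantity 1).map (fun _ => [])
  (PySem.List.enumerate sts 0).map (fun is =>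
    horizontal_stacks_group.foldl (fun stack grp =>
      (PySem.List.enumerate grp 0).foldl (fun stack je =>
        if is.1 == je.1 && !(je.2 == "") then stack ++ [je.2] else stack) stack) is.2)

-- ===== PORT B =====
def build_initial_stacks_alt (horizontal_stacks_group : List (List String)) (stack_quantity : Int) : List (List String) :=
  let q : Int := max stack_quantity 0
  let width : Int := horizontal_stacks_group.foldl (fun w row => max w (row.length : Int)) 0
  -- row[j]: the filter guard ensures 0 ≤ j < len(row), so pyGet? is some and getD's default is unused
  let cols : List (List String) := (PySem.List.pyRange 0 (min width q) 1).map (fun j =>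
    (horizontal_stacks_group.filter (fun row => decide (j < (row.length : Int)))).map
      (fun row => (PySem.List.pyGet? row j).getD ""))
  let built := cols.map (fun col => col.filter (fun e => !(e == "")))
  built ++ (PySem.List.pyRange 0 (q - (built.length : Int)) 1).map (fun _ => ([] : List String))

-- ===== PRECONDITION & SPEC =====
def Spec_build_initial_stacks (horizontal_stacks_group : List (List String)) (stack_quantity : Int) (out : List (List String)) : Prop := out = build_initial_stacks_alt horizontal_stacks_group stack_quantity
instance (horizontal_stacks_group : List (List String)) (stack_quantity : Int) (out : List (List String)) : Decidable (Spec_build_initial_stacks horizontal_stacks_group stack_quantity out) := by unfold Spec_build_initial_stacks; infer_instance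

-- ===== CLAIM (what is proved, stated in full; the proofs are below) =====
def Claim_equal_build_initial_stacks : Prop := ∀ (horizontal_stacks_group : List (List String)) (stack_quantity : Int), Dom_build_initial_stacks horizontal_stacks_group stack_quantity → Spec_build_initial_stacks horizontal_stacks_group stack_quantity (build_initial_stacks horizontal_stacks_group stack_quantity)

-- ===== LEMMAS AND PROOFS =====

-- what A appends to stack i from one row
def colA (i : Int) (grp : List String) : List String :=
  ((PySem.List.enumerate grp 0).filter (fun je => i == je.1 && !(je.2 == ""))).map (·.2)

theorem A_getElem? (g : List (List String)) (q : Int) (k : Nat) :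
    (build_initial_stacks g q)[k]? =
      if k < q.toNat then some (g.flatMap (colA (k : Int))) else none := by
  have hinner : ∀ (st grp : List String),
      (PySem.List.enumerate grp 0).foldl (fun st je =>
        if ((0:Int)+(k:Int)) == je.1 && !(je.2 == "") then st ++ [je.2] else st) st
      = st ++ colA (k : Int) grp := by
    intro st grp
    rw [PySem.List.foldl_append_if]
    simp [colA]
  simp only [build_initial_stacks]
  rw [List.getElem?_map, PySem.List.getElem?_enumerate]
  rw [List.getElem?_map]
  rw [PySem.List.getElem?_pyRange_one]
  by_cases hk : k < (q - 0).toNat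
  · rw [if_pos hk, if_pos (by omega : k < q.toNat)]
    simp only [Option.map_some]
    simp only [hinner]
    rw [PySem.List.foldl_append_eq_flatMap]
    simp
  · rw [if_neg hk, if_neg (by omega : ¬ k < q.toNat)]
    simp

-- A's per-row harvest at index s+j is the j-th cell, kept iff non-empty
theorem colGen (grp : List String) (s : Int) (j : Nat) :
    ((PySem.List.enumerate grp s).filter (fun je => (s + (j : Int)) == je.1 && !(je.2 == ""))).map (·.2)
    = (grp[j]?.toList).filter (fun e => !(e == "")) := by
  induction grp generalizing s j with
  | nil => simp [PySem.List.enumerate_nil]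
  | cons x xs ih =>
    rw [PySem.List.enumerate_cons]
    cases j with
    | zero =>
      have htail : (PySem.List.enumerate xs (s + 1)).filter
          (fun je => (s + ((0:Nat) : Int)) == je.1 && !(je.2 == "")) = [] := by
        rw [List.filter_eq_nil_iff]
        intro p hp
        rw [PySem.List.mem_enumerate_iff] at hp
        obtain ⟨m, hm, rfl⟩ := hp
        simp only [Bool.and_eq_true, beq_iff_eq, not_and]
        intro hc; omega
      simp only [List.filter_cons, htail]
      by_cases hx : x = "" <;> simp [hx]
    | succ j' =>
      have hcast : (s + ((j' + 1 : Nat) : Int)) = (s + 1) + ((j' : Nat) : Int) := by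
        push_cast; ring
      have hhead : (((s + 1) + ((j' : Nat) : Int)) == s && !(x == "")) = false := by
        simp only [Bool.and_eq_false_iff]
        left; simp; omega
      simp only [hcast, List.filter_cons, hhead, Bool.false_eq_true, if_false]
      rw [ih (s + 1) j']
      simp

theorem colA_eq (grp : List String) (k : Nat) :
    colA (k : Int) grp = (grp[k]?.toList).filter (fun e => !(e == "")) := by
  have := colGen grp 0 k
  simpa [colA] using this

-- the flatMap of A's harvests over all rows is B's filtered column
theorem flatMap_colA (g : List (List String)) (k : Nat) :
    g.flatMap (colA (k : Int)) =
      ((g.filter (fun row => decide ((k : Int) < (row.length : Int)))).map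
        (fun row => (PySem.List.pyGet? row ((k : Int))).getD "")).filter (fun e => !(e == "")) := by
  induction g with
  | nil => simp
  | cons row g ih =>
    simp only [List.flatMap_cons, List.filter_cons, ih]
    by_cases h : k < row.length
    · rw [if_pos (by simp; omega)]
      have : PySem.List.pyGet? row ((k : Int)) = some row[k] := by
        rw [PySem.List.pyGet?_natCast]; simp [h]
      simp only [List.map_cons, List.filter_cons, this, Option.getD_some]
      rw [colA_eq]
      have : row[k]? = some row[k] := by simp [h]
      by_cases hx : row[k] = "" <;> simp [this, hx]
    · rw [if_neg (by simp; omega)]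
      rw [colA_eq]
      have : row[k]? = none := by simp; omega
      simp [this]

theorem B_getElem? (g : List (List String)) (q : Int) (k : Nat) :
    (build_initial_stacks_alt g q)[k]? =
      if k < q.toNat then some (g.flatMap (colA (k : Int))) else none := by
  simp only [build_initial_stacks_alt]
  set W : Int := g.foldl (fun w row => max w (row.length : Int)) 0 with hW
  have hW0 : 0 ≤ W := (PySem.List.le_foldl_max_int g (fun row => (row.length : Int)) 0).1
  have hWall : ∀ row ∈ g, (row.length : Int) ≤ W :=
    (PySem.List.le_foldl_max_int g (fun row => (row.length : Int)) 0).2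
  have hlen : ((PySem.List.pyRange 0 (min W (max q 0)) 1).map (fun j =>
      (g.filter (fun row => decide (j < (row.length : Int)))).map
        (fun row => (PySem.List.pyGet? row j).getD "")) |>.map
        (fun col => col.filter (fun e => !(e == "")))).length = (min W (max q 0)).toNat := by
    simp [PySem.List.length_pyRange_one]
  rw [List.getElem?_append]
  by_cases hk : k < (min W (max q 0)).toNat
  · rw [if_pos (by rw [hlen]; exact hk)]
    rw [if_pos (by omega : k < q.toNat)]
    rw [List.getElem?_map, List.getElem?_map, PySem.List.getElem?_pyRange_one]
    rw [if_pos (by omega : k < (min W (max q 0) - 0).toNat)]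
    simp only [Option.map_some, zero_add]
    rw [flatMap_colA]
  · rw [if_neg (by rw [hlen]; exact hk)]
    rw [hlen, List.getElem?_map, PySem.List.getElem?_pyRange_one]
    by_cases hq : k < q.toNat
    · rw [if_pos hq, if_pos (by omega : k - (min W (max q 0)).toNat < (max q 0 - ((min W (max q 0)).toNat : Int) - 0).toNat)]
      simp only [Option.map_some, Option.some.injEq]
      -- k ≥ W: every row is too short, so every harvest is empty
      have : ∀ row ∈ g, colA (k : Int) row = [] := by
        intro row hrow
        rw [colA_eq]
        have : row[k]? = none := by
          have := hWall row hrow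
          simp; omega
        simp [this]
      rw [List.flatMap_eq_nil_iff.mpr this]
    · rw [if_neg hq, if_neg (by omega : ¬ k - (min W (max q 0)).toNat < (max q 0 - ((min W (max q 0)).toNat : Int) - 0).toNat)]
      simp

-- ===== VERDICT (by name: the statement is the Claim_ definition above) =====
theorem build_initial_stacks_spec : Claim_equal_build_initial_stacks := by
  intro g q _
  unfold Spec_build_initial_stacks
  apply List.ext_getElem?
  intro k
  rw [A_getElem?, B_getElem?]
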